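-- pv_equiv track=rewrite | github.com/tiberiuslazarus/EasyAutoSimC | analyze.py | getCharStats
-- ===== SOURCE A (Python) =====
-- def getCharStats(simcOutput):
-- 	charStats = {}
-- 	coreFound = False
-- 	genericFound = False
-- 	spellFound = False
-- 	attackFound = False
-- 	defenseFound = False
--
-- 	for line in simcOutput.split("\n"):
-- 		if "Core Stats" in line and not coreFound:
-- 			coreFound = True
-- 			charStats["core"] = splitStats(line)
-- 		elif "Generic Stats" in line and not genericFound:
-- 			genericFound = True
-- 			charStats["generic"] = splitStats(line)
-- 		elif "Spells Stats" in line and not spellFound: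
-- 			spellFound = True
-- 			charStats["spell"] = splitStats(line)
-- 		elif "Attack Stats" in line and not attackFound:
-- 			attackFound = True
-- 			charStats["attack"] = splitStats(line)
-- 		elif "Defense Stats" in line and not defenseFound:
-- 			defenseFound = True
-- 			charStats["defense"] = splitStats(line)
-- 		if coreFound and genericFound and spellFound and attackFound and defenseFound:
-- 			break
--
-- 	return charStats
--
-- def splitStats(statsLine):
-- 	stats = statsLine.split()
-- 	statsDict = {}
-- 	for stat in stats:
-- 		if "=" in stat:
-- 			statSplit = stat.split("=")
-- 			statValSplit = statSplit[1].split("|")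
-- 			statsDict[statSplit[0]] = {
-- 				"buffed": statValSplit[0],
-- 				"unbuffed": statValSplit[1].split("(")[0]
-- 			}
-- 	return statsDict
-- ===== SOURCE B (Python) =====
-- _SECTIONS = [
--     ("Core Stats", "core"),
--     ("Generic Stats", "generic"),
--     ("Spells Stats", "spell"),
--     ("Attack Stats", "attack"),
--     ("Defense Stats", "defense"),
-- ]
--
--
-- def splitStats(statsLine):
-- 	stats = statsLine.split()
-- 	statsDict = {}
-- 	for stat in stats:
-- 		if "=" in stat:
-- 			statSplit = stat.split("=")
-- 			statValSplit = statSplit[1].split("|")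
-- 			statsDict[statSplit[0]] = {
-- 				"buffed": statValSplit[0],
-- 				"unbuffed": statValSplit[1].split("(")[0]
-- 			}
-- 	return statsDict
--
--
-- def _scan(lines, pending):
-- 	# find the next "event": the first line containing any still-pending marker,
-- 	# record the first pending marker it contains, recurse on the remaining
-- 	# lines with that section removed from the pending table.
-- 	for i, line in enumerate(lines):
-- 		for j in range(len(pending)):
-- 			marker, key = pending[j]
-- 			if marker in line:
-- 				out = {key: splitStats(line)}
-- 				out.update(_scan(lines[i + 1:], pending[:j] + pending[j + 1:]))
-- 				return out
-- 	return {}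
--
--
-- def getCharStats(simcOutput):
-- 	return _scan(simcOutput.split("\n"), list(_SECTIONS))
-- ===== Notes on version B (the rewrite author's own statement) =====
-- stated objective: alternative
-- what changed: Replaces A's stateful single pass with five boolean flags by an event-driven recursion: repeatedly search for the next line containing any still-pending marker, emit that section, and recurse on the remaining line suffix with the matched section removed from the pending table; the result dict is built front-to-back by dict-union instead of mutated under flags.
import Mathlib
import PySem

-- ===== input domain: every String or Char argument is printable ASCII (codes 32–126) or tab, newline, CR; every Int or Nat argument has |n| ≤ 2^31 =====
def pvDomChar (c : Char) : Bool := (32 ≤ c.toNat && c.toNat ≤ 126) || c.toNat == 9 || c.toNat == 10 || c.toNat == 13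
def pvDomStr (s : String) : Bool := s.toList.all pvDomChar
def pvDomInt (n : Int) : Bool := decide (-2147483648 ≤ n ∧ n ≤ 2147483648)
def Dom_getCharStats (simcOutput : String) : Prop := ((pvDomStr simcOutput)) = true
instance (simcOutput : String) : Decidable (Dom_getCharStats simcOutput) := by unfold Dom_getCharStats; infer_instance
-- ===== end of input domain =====

-- B replaces A's flag-driven single pass by an event-driven recursion: find the next line
-- containing any still-pending marker, emit that section, recurse on the line suffix with
-- the matched section removed from the pending table; same results, alternative structure.


-- ===== PORT A =====
-- shared helper: splitStats (identical in A and B; B keeps it unchanged).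
-- statValSplit[1] raises IndexError in Python when no "|" is present; Pre_ excludes
-- those inputs, here the access is defaulted to "".
def pvSplitStats (statsLine : String) : List (String × List (String × String)) :=
  let stats := PySem.Str.split₀ statsLine
  let statsDict : PySem.Dict String (List (String × String)) :=
    stats.foldl (fun statsDict stat =>
      if PySem.Str.isIn "=" stat then
        let statSplit := (PySem.Str.split? stat "=").getD []
        let statValSplit := (PySem.Str.split? (statSplit.getD 1 "") "|").getD []
        statsDict.insert (statSplit.getD 0 "")
          [("buffed", statValSplit.getD 0 ""),
           ("unbuffed", ((PySem.Str.split? (statValSplit.getD 1 "") "(").getD []).getD 0 "")]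
      else statsDict) PySem.Dict.empty
  statsDict.items

-- A's loop: pvLoopA is the body's elif chain over the five flags, pvCheckA the
-- trailing "break when all five found" check.
mutual
def pvLoopA : List String → PySem.Dict String (List (String × List (String × String))) →
    Bool → Bool → Bool → Bool → Bool → PySem.Dict String (List (String × List (String × String)))
  | [], cs, _, _, _, _, _ => cs
  | line :: rest, cs, c, g, sp, ak, df =>
    if PySem.Str.isIn "Core Stats" line && !c then
      pvCheckA rest (cs.insert "core" (pvSplitStats line)) true g sp ak df
    else if PySem.Str.isIn "Generic Stats" line && !g then
      pvCheckA rest (cs.insert "generic" (pvSplitStats line)) c true sp ak df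
    else if PySem.Str.isIn "Spells Stats" line && !sp then
      pvCheckA rest (cs.insert "spell" (pvSplitStats line)) c g true ak df
    else if PySem.Str.isIn "Attack Stats" line && !ak then
      pvCheckA rest (cs.insert "attack" (pvSplitStats line)) c g sp true df
    else if PySem.Str.isIn "Defense Stats" line && !df then
      pvCheckA rest (cs.insert "defense" (pvSplitStats line)) c g sp ak true
    else
      pvCheckA rest cs c g sp ak df

def pvCheckA (rest : List String) (cs : PySem.Dict String (List (String × List (String × String))))
    (c g sp ak df : Bool) : PySem.Dict String (List (String × List (String × String))) :=
  if c && g && sp && ak && df then cs else pvLoopA rest cs c g sp ak df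
end

def getCharStats (simcOutput : String) : List (String × List (String × List (String × String))) :=
  (pvLoopA ((PySem.Str.split? simcOutput "\n").getD []) PySem.Dict.empty
    false false false false false).items

-- ===== PORT B =====
def pvSections : List (String × String) :=
  [("Core Stats", "core"), ("Generic Stats", "generic"), ("Spells Stats", "spell"),
   ("Attack Stats", "attack"), ("Defense Stats", "defense")]

-- inner loop of _scan: first pending pair whose marker occurs in the line, together with
-- the pending table with that pair removed (pending[:j] + pending[j+1:])
def pvFind : List (String × String) → String → Option (String × List (String × String))
  | [], _ => none
  | (m, k) :: ps, line =>
    if PySem.Str.isIn m line then some (k, ps)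
    else (pvFind ps line).map (fun r => (r.1, (m, k) :: r.2))

-- _scan: find the next event line, record its section, recurse on the remaining lines
-- with that section removed from pending; out = {key: …}; out.update(recursive result)
def pvScan : List String → List (String × String) →
    PySem.Dict String (List (String × List (String × String)))
  | [], _ => PySem.Dict.empty
  | line :: rest, pending =>
    match pvFind pending line with
    | none => pvScan rest pending
    | some (key, pending') =>
      (pvScan rest pending').items.foldl (fun d kv => d.insert kv.1 kv.2)
        (PySem.Dict.empty.insert key (pvSplitStats line))

def getCharStats_alt (simcOutput : String) : List (String × List (String × List (String × String))) :=
  (pvScan ((PySem.Str.split? simcOutput "\n").getD []) pvSections).items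

-- ===== PRECONDITION & SPEC =====
def pvMarkers : List String :=
  ["Core Stats", "Generic Stats", "Spells Stats", "Attack Stats", "Defense Stats"]

-- a whitespace token is good if it has no "=" or its part between the first and second "="
-- contains a "|" (otherwise splitStats raises IndexError on statValSplit[1])
def pvGoodTok (tok : String) : Bool :=
  !PySem.Str.isIn "=" tok ||
    PySem.Str.isIn "|" (((PySem.Str.split? tok "=").getD []).getD 1 "")

def pvGoodLine (line : String) : Bool :=
  !pvMarkers.any (fun m => PySem.Str.isIn m line) || (PySem.Str.split₀ line).all pvGoodTok

-- Pre_ excludes inputs where splitStats raises IndexError (an "=" token with no "|" on a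
-- section-marker line); it over-approximates slightly: it also requires well-formed tokens
-- on marker lines A never parses (duplicate marker lines, lines after all five sections are
-- found), excluding a few inputs on which A still returns (see cites).
def Pre_getCharStats (simcOutput : String) : Prop :=
  (((PySem.Str.split? simcOutput "\n").getD []).all pvGoodLine) = true

instance (simcOutput : String) : Decidable (Pre_getCharStats simcOutput) := by
  unfold Pre_getCharStats; infer_instance

def pvWitness_getCharStats : String := "Core Stats a=1|2"

def Spec_getCharStats (simcOutput : String) (out : List (String × List (String × List (String × String)))) : Prop := out = getCharStats_alt simcOutput
instance (simcOutput : String) (out : List (String × List (String × List (String × String)))) : Decidable (Spec_getCharStats simcOutput out) := by unfold Spec_getCharStats; infer_instance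

-- ===== CLAIM (what is proved, stated in full; the proofs are below) =====
def Claim_equal_getCharStats : Prop := ∀ (simcOutput : String), Dom_getCharStats simcOutput → Pre_getCharStats simcOutput → Spec_getCharStats simcOutput (getCharStats simcOutput)

-- ===== LEMMAS AND PROOFS =====

-- the pending table corresponding to A's five flags
def pendingOf (c g sp ak df : Bool) : List (String × String) :=
  (if c then [] else [("Core Stats", "core")]) ++
  (if g then [] else [("Generic Stats", "generic")]) ++
  (if sp then [] else [("Spells Stats", "spell")]) ++
  (if ak then [] else [("Attack Stats", "attack")]) ++
  (if df then [] else [("Defense Stats", "defense")])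

lemma pvFind_none {pending : List (String × String)} {line : String}
    (h : pvFind pending line = none) : ∀ p ∈ pending, PySem.Str.isIn p.1 line = false := by
  induction pending with
  | nil => intro p hp; cases hp
  | cons q ps ih =>
    obtain ⟨m, k⟩ := q
    rw [pvFind] at h
    intro p hp
    by_cases hm : PySem.Str.isIn m line = true
    · rw [if_pos hm] at h; cases h
    · rw [if_neg hm] at h
      have h' : pvFind ps line = none := by
        rcases ho : pvFind ps line with _ | v
        · rfl
        · rw [ho] at h; simp at h
      rcases List.mem_cons.mp hp with rfl | hp'
      · simpa using hm
      · exact ih h' p hp'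

lemma pvFind_perm {pending : List (String × String)} {line : String} {key : String}
    {P' : List (String × String)} (h : pvFind pending line = some (key, P')) :
    List.Perm (pending.map Prod.snd) (key :: P'.map Prod.snd) := by
  induction pending generalizing P' with
  | nil => simp [pvFind] at h
  | cons q ps ih =>
    obtain ⟨m, k⟩ := q
    rw [pvFind] at h
    by_cases hm : PySem.Str.isIn m line = true
    · rw [if_pos hm] at h
      rw [Option.some.injEq, Prod.mk.injEq] at h
      obtain ⟨rfl, rfl⟩ := h
      simp
    · rw [if_neg hm] at h
      rcases ho : pvFind ps line with _ | ⟨k', R⟩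
      · rw [ho] at h; simp at h
      · rw [ho] at h
        simp only [Option.map_some, Option.some.injEq, Prod.mk.injEq] at h
        obtain ⟨rfl, rfl⟩ := h
        have hp := ih ho
        simp only [List.map_cons]
        exact ((hp.cons k).trans (List.Perm.swap k' k _))

lemma pvScan_pending_nil : ∀ lines : List String, pvScan lines [] = PySem.Dict.empty := by
  intro lines
  induction lines with
  | nil => rfl
  | cons line rest ih => simpa [pvScan, pvFind] using ih

-- keys of a scan: unique and drawn from the pending table's keys
lemma pvScan_keys : ∀ (lines : List String) (pending : List (String × String)),
    (pending.map Prod.snd).Nodup →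
    (pvScan lines pending).keys.Nodup ∧
      ∀ x ∈ (pvScan lines pending).keys, x ∈ pending.map Prod.snd := by
  intro lines
  induction lines with
  | nil => intro pending _; simp [pvScan, PySem.Dict.keys_empty]
  | cons line rest ih =>
    intro pending hnd
    rcases hf : pvFind pending line with _ | ⟨key, P'⟩
    · simpa [pvScan, hf] using ih pending hnd
    · have hperm := pvFind_perm hf
      have hnd' := hperm.nodup_iff.mp hnd
      have hndP' : (P'.map Prod.snd).Nodup := hnd'.of_cons
      have hkey : key ∉ P'.map Prod.snd := (List.nodup_cons.mp hnd').1
      obtain ⟨hrecnd, hrecsub⟩ := ih P' hndP'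
      have hfresh : ∀ a ∈ (pvScan rest P').items,
          (PySem.Dict.empty.insert key (pvSplitStats line)).contains a.1 = false := by
        intro a ha
        have hak : a.1 ∈ P'.map Prod.snd := hrecsub a.1 (List.mem_map_of_mem ha)
        have hne : a.1 ≠ key := fun h => hkey (h ▸ hak)
        simp [PySem.Dict.contains_insert, PySem.Dict.contains_empty, hne]
      have hitems : (pvScan (line :: rest) pending).items
          = (key, pvSplitStats line) :: (pvScan rest P').items := by
        simp only [pvScan, hf]
        have hrecnd' : ((pvScan rest P').items.map Prod.fst).Nodup := by
          simpa [PySem.Dict.keys] using hrecnd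
        rw [PySem.Dict.items_foldl_insert_fresh (pvScan rest P').items Prod.fst Prod.snd
            (PySem.Dict.empty.insert key (pvSplitStats line)) hfresh hrecnd',
            PySem.Dict.items_insert_of_not_contains PySem.Dict.empty (pvSplitStats line)
              (PySem.Dict.contains_empty key)]
        simp [show (PySem.Dict.empty : PySem.Dict String (List (String × List (String × String)))).items = [] from rfl]
      have hkeys : (pvScan (line :: rest) pending).keys = key :: (pvScan rest P').keys := by
        simp only [PySem.Dict.keys, hitems, List.map_cons]
      constructor
      · rw [hkeys]
        refine List.nodup_cons.mpr ⟨fun hin => hkey (hrecsub key hin), hrecnd⟩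
      · intro x hx
        rw [hkeys] at hx
        have hmem : ∀ y, y ∈ key :: P'.map Prod.snd → y ∈ pending.map Prod.snd :=
          fun y hy => hperm.mem_iff.mpr hy
        rcases List.mem_cons.mp hx with rfl | hx'
        · exact hmem x (by simp)
        · exact hmem x (List.mem_cons_of_mem _ (hrecsub x hx'))
    -- matched case: the scan's items are the new section followed by the recursive items

lemma pvScan_cons_some {pending : List (String × String)} {line : String} {key : String}
    {P' : List (String × String)} (rest : List String)
    (hf : pvFind pending line = some (key, P')) (hnd : (pending.map Prod.snd).Nodup) :
    (pvScan (line :: rest) pending).items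
      = (key, pvSplitStats line) :: (pvScan rest P').items := by
  have hperm := pvFind_perm hf
  have hnd' := hperm.nodup_iff.mp hnd
  have hndP' : (P'.map Prod.snd).Nodup := hnd'.of_cons
  have hkey : key ∉ P'.map Prod.snd := (List.nodup_cons.mp hnd').1
  obtain ⟨hrecnd, hrecsub⟩ := pvScan_keys rest P' hndP'
  have hfresh : ∀ a ∈ (pvScan rest P').items,
      (PySem.Dict.empty.insert key (pvSplitStats line)).contains a.1 = false := by
    intro a ha
    have hak : a.1 ∈ P'.map Prod.snd := hrecsub a.1 (List.mem_map_of_mem ha)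
    have hne : a.1 ≠ key := fun h => hkey (h ▸ hak)
    simp [PySem.Dict.contains_insert, PySem.Dict.contains_empty, hne]
  simp only [pvScan, hf]
  have hrecnd' : ((pvScan rest P').items.map Prod.fst).Nodup := by
    simpa [PySem.Dict.keys] using hrecnd
  rw [PySem.Dict.items_foldl_insert_fresh (pvScan rest P').items Prod.fst Prod.snd
        (PySem.Dict.empty.insert key (pvSplitStats line)) hfresh hrecnd',
      PySem.Dict.items_insert_of_not_contains PySem.Dict.empty (pvSplitStats line)
        (PySem.Dict.contains_empty key)]
  simp [show (PySem.Dict.empty : PySem.Dict String (List (String × List (String × String)))).items = [] from rfl]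

lemma nodup_pendingOf (c g sp ak df : Bool) : ((pendingOf c g sp ak df).map Prod.snd).Nodup := by
  cases c <;> cases g <;> cases sp <;> cases ak <;> cases df <;> decide

-- A's elif chain realises exactly pvFind on the pending table of the current flags
lemma pvStep_some {line : String} {c g sp ak df : Bool} {key : String}
    {P' : List (String × String)}
    (h : pvFind (pendingOf c g sp ak df) line = some (key, P'))
    (cs : PySem.Dict String (List (String × List (String × String)))) (rest : List String) :
    pvLoopA (line :: rest) cs c g sp ak df
      = pvCheckA rest (cs.insert key (pvSplitStats line)) (c || key == "core")
          (g || key == "generic") (sp || key == "spell") (ak || key == "attack")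
          (df || key == "defense")
    ∧ P' = pendingOf (c || key == "core") (g || key == "generic") (sp || key == "spell")
          (ak || key == "attack") (df || key == "defense") := by
  cases c <;> cases g <;> cases sp <;> cases ak <;> cases df <;>
    · simp only [pendingOf, Bool.false_eq_true, if_false, if_true,
        List.append_nil, List.nil_append, List.cons_append, List.append_assoc] at h ⊢
      simp only [pvFind] at h
      rw [pvLoopA]
      simp only [Bool.not_false, Bool.not_true, Bool.and_true, Bool.and_false,
        Bool.false_eq_true, if_false]
      first
        | (split_ifs at h <;> first
            | (obtain ⟨rfl, rfl⟩ := h; simp_all)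
            | simp_all)
        | simp_all

lemma pvStep_none {line : String} {c g sp ak df : Bool}
    (h : pvFind (pendingOf c g sp ak df) line = none)
    (cs : PySem.Dict String (List (String × List (String × String)))) (rest : List String) :
    pvLoopA (line :: rest) cs c g sp ak df = pvCheckA rest cs c g sp ak df := by
  have hno := pvFind_none h
  have h1 : (PySem.Str.isIn "Core Stats" line && !c) = false := by
    cases c
    · have := hno ("Core Stats", "core") (by simp [pendingOf]); simp_all
    · simp
  have h2 : (PySem.Str.isIn "Generic Stats" line && !g) = false := by
    cases g
    · have := hno ("Generic Stats", "generic") (by cases c <;> simp [pendingOf]); simp_all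
    · simp
  have h3 : (PySem.Str.isIn "Spells Stats" line && !sp) = false := by
    cases sp
    · have := hno ("Spells Stats", "spell") (by cases c <;> cases g <;> simp [pendingOf]); simp_all
    · simp
  have h4 : (PySem.Str.isIn "Attack Stats" line && !ak) = false := by
    cases ak
    · have := hno ("Attack Stats", "attack")
        (by cases c <;> cases g <;> cases sp <;> simp [pendingOf]); simp_all
    · simp
  have h5 : (PySem.Str.isIn "Defense Stats" line && !df) = false := by
    cases df
    · have := hno ("Defense Stats", "defense")
        (by cases c <;> cases g <;> cases sp <;> cases ak <;> simp [pendingOf]); simp_all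
    · simp
  rw [pvLoopA, h1, h2, h3, h4, h5]
  simp

-- main invariant: the A loop appends to cs exactly the sections the B scan finds
lemma pvMain : ∀ (lines : List String)
    (cs : PySem.Dict String (List (String × List (String × String)))) (c g sp ak df : Bool),
    (∀ x ∈ (pendingOf c g sp ak df).map Prod.snd, cs.contains x = false) →
    (pvLoopA lines cs c g sp ak df).items
      = cs.items ++ (pvScan lines (pendingOf c g sp ak df)).items := by
  intro lines
  induction lines with
  | nil => intro cs c g sp ak df _; simp [pvLoopA, pvScan]; rfl
  | cons line rest ih =>
    intro cs c g sp ak df hcs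
    have hchk : ∀ (cs' : PySem.Dict String (List (String × List (String × String))))
        (c' g' sp' ak' df' : Bool),
        (∀ x ∈ (pendingOf c' g' sp' ak' df').map Prod.snd, cs'.contains x = false) →
        (pvCheckA rest cs' c' g' sp' ak' df').items
          = cs'.items ++ (pvScan rest (pendingOf c' g' sp' ak' df')).items := by
      intro cs' c' g' sp' ak' df' hcs'
      rw [pvCheckA]
      split_ifs with hfull
      · have : pendingOf c' g' sp' ak' df' = [] := by
          simp only [Bool.and_eq_true] at hfull
          obtain ⟨⟨⟨⟨hc, hg⟩, hsp⟩, hak⟩, hdf⟩ := hfull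
          simp [pendingOf, hc, hg, hsp, hak, hdf]
        rw [this, pvScan_pending_nil]
        show cs'.items = cs'.items ++ []
        simp
      · exact ih cs' c' g' sp' ak' df' hcs'
    rcases hf : pvFind (pendingOf c g sp ak df) line with _ | ⟨key, P'⟩
    · rw [pvStep_none hf cs rest, hchk cs c g sp ak df hcs]
      simp [pvScan, hf]
    · obtain ⟨hA, hP⟩ := pvStep_some hf cs rest
      have hperm := pvFind_perm hf
      have hkeymem : key ∈ (pendingOf c g sp ak df).map Prod.snd := hperm.mem_iff.mpr (by simp)
      have hcskey : cs.contains key = false := hcs key hkeymem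
      have hndP : ((pendingOf c g sp ak df).map Prod.snd).Nodup := nodup_pendingOf c g sp ak df
      have hkeyP' : key ∉ P'.map Prod.snd := (List.nodup_cons.mp (hperm.nodup_iff.mp hndP)).1
      have hcs' : ∀ x ∈ (pendingOf (c || key == "core") (g || key == "generic")
          (sp || key == "spell") (ak || key == "attack") (df || key == "defense")).map Prod.snd,
          (cs.insert key (pvSplitStats line)).contains x = false := by
        intro x hx
        rw [← hP] at hx
        have hxP : x ∈ (pendingOf c g sp ak df).map Prod.snd := hperm.mem_iff.mpr (by simp [hx])
        have hne : x ≠ key := fun h => hkeyP' (h ▸ hx)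
        simp [PySem.Dict.contains_insert, hcs x hxP, hne]
      rw [hA, hchk _ _ _ _ _ _ hcs', ← hP,
          pvScan_cons_some rest hf hndP,
          PySem.Dict.items_insert_of_not_contains cs (pvSplitStats line) hcskey]
      simp

-- ===== VERDICT (by name: the statement is the Claim_ definition above) =====
theorem getCharStats_spec : Claim_equal_getCharStats := by
  intro s _ _
  unfold Spec_getCharStats getCharStats getCharStats_alt
  have h := pvMain ((PySem.Str.split? s "\n").getD []) PySem.Dict.empty false false false false false
    (by intro x _; exact PySem.Dict.contains_empty x)
  have hpend : pendingOf false false false false false = pvSections := rfl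
  rw [hpend] at h
  rw [h]
  rfl
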